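-- pv_equiv track=rewrite | github.com/Arattel/Spam_generation | helpers/parsing.py | extract_header_and_body
-- ===== SOURCE A (Python) =====
-- def extract_header_and_body(file):
--     body_part = False
--     header, body = '', ''
--     for line in file:
--         if line == '\n':
--             body_part = True
--         if not body_part:
--             header += line
--         else:
--             body += line
--     return header, body
-- ===== SOURCE B (Python) =====
-- def extract_header_and_body(file):
--     lines = list(file)
--     i = next((k for k, line in enumerate(lines) if line == '\n'), len(lines))
--     return ''.join(lines[:i]), ''.join(lines[i:])
-- ===== Notes on version B (the rewrite author's own statement) =====
-- stated objective: simpler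
-- what changed: Replaces the per-line boolean-flag branching accumulator with locating the index of the first blank line and joining the two slices around it.
import Mathlib
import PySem

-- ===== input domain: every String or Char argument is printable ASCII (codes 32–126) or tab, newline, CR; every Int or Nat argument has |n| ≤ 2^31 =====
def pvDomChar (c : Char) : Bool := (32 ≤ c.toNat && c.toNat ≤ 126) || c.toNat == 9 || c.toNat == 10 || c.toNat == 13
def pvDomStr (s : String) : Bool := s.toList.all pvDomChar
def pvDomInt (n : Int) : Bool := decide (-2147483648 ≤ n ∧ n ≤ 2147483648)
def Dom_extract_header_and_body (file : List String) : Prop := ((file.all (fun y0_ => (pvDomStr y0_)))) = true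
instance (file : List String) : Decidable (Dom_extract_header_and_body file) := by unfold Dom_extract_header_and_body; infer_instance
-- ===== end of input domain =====

-- B replaces A's per-line boolean-flag accumulator by locating the first blank line and joining the two slices (simpler decomposition; same O(n) cost).

-- ===== PORT A =====
-- one loop step of A: set the flag on '\n', then append the line to header or body by the flag
def pvStepA (st : Bool × String × String) (line : String) : Bool × String × String :=
  let bp := if line == "\n" then true else st.1
  if bp = false then (bp, st.2.1 ++ line, st.2.2)
  else (bp, st.2.1, st.2.2 ++ line)

def extract_header_and_body (file : List String) : String × String :=
  let r := file.foldl pvStepA (false, "", "")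
  (r.2.1, r.2.2)

-- ===== PORT B =====
def extract_header_and_body_alt (file : List String) : String × String :=
  let i := file.findIdx (fun line => line == "\n")   -- = len(file) when absent, like next(…, len(lines))
  (PySem.Str.join "" (file.take i), PySem.Str.join "" (file.drop i))

-- ===== PRECONDITION & SPEC =====
def Spec_extract_header_and_body (file : List String) (out : String × String) : Prop := out = extract_header_and_body_alt file
instance (file : List String) (out : String × String) : Decidable (Spec_extract_header_and_body file out) := by unfold Spec_extract_header_and_body; infer_instance

-- ===== CLAIM (what is proved, stated in full; the proofs are below) =====
def Claim_equal_extract_header_and_body : Prop := ∀ (file : List String), Dom_extract_header_and_body file → Spec_extract_header_and_body file (extract_header_and_body file)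

-- ===== LEMMAS AND PROOFS =====

theorem join_empty_nil : PySem.Str.join "" ([] : List String) = "" := by decide

theorem join_empty_cons (a : String) (l : List String) :
    PySem.Str.join "" (a :: l) = a ++ PySem.Str.join "" l := by
  cases l with
  | nil =>
    apply String.ext
    simp [PySem.Str.join, PySem.Chars.join, List.intercalate]
  | cons b t =>
    apply String.ext
    simp [PySem.Str.toList_join, PySem.Chars.join_cons_cons]

theorem loopA_true (l : List String) : ∀ h b : String,
    List.foldl pvStepA (true, h, b) l = (true, h, b ++ PySem.Str.join "" l) := by
  induction l with
  | nil => intro h b; simp [join_empty_nil]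
  | cons a t ih =>
    intro h b
    simp [List.foldl, pvStepA, ih, join_empty_cons, String.append_assoc]

theorem loopA_false (l : List String) : ∀ h b : String,
    List.foldl pvStepA (false, h, b) l =
      (l.any (fun line => line == "\n"),
       h ++ PySem.Str.join "" (l.take (l.findIdx (fun line => line == "\n"))),
       b ++ PySem.Str.join "" (l.drop (l.findIdx (fun line => line == "\n")))) := by
  induction l with
  | nil => intro h b; simp [join_empty_nil]
  | cons a t ih =>
    intro h b
    by_cases hnl : a = "\n"
    · subst hnl
      simp [List.foldl, pvStepA, loopA_true, List.findIdx_cons, join_empty_nil, join_empty_cons, String.append_assoc]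
    · have hb : (a == "\n") = false := by simp [hnl]
      simp [List.foldl, pvStepA, hb, ih, List.findIdx_cons, join_empty_cons, String.append_assoc]

-- ===== VERDICT (by name: the statement is the Claim_ definition above) =====
theorem extract_header_and_body_spec : Claim_equal_extract_header_and_body := by
  intro file _
  unfold Spec_extract_header_and_body extract_header_and_body extract_header_and_body_alt
  simp [loopA_false]
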